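-- pv_equiv track=rewrite | github.com/enoughio/DSA | revision/november 2025/checkifarrayIsSortedOrNot.py | check
-- ===== SOURCE A (Python) =====
-- from typing import List
--
-- def check(nums: List[int]) -> bool:
--
--     i,j = 0, 0
--     n = len(nums)
--
--     while(i < n and  j < 2*n):
--
--         idx = j%n
--         if nums[idx - 1] > nums[idx] :
--             i = j
--
--         if ( j-i+1 == n ):
--             return True
--
--         j+=1
--
--
--     return False
-- ===== SOURCE B (Python) =====
-- from typing import List
--
-- def check(nums: List[int]) -> bool:
--     n = len(nums)
--     if n == 0:
--         return False
--     count = 0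
--     for i in range(n):
--         if nums[i - 1] > nums[i]:
--             count += 1
--     return count <= 1
-- ===== Notes on version B (the rewrite author's own statement) =====
-- stated objective: simpler
-- what changed: A slides a length-n window over the doubled array with a reset pointer and early return; B makes one flat pass counting circular descents (nums[i-1] > nums[i]) and returns count <= 1.
import Mathlib
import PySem

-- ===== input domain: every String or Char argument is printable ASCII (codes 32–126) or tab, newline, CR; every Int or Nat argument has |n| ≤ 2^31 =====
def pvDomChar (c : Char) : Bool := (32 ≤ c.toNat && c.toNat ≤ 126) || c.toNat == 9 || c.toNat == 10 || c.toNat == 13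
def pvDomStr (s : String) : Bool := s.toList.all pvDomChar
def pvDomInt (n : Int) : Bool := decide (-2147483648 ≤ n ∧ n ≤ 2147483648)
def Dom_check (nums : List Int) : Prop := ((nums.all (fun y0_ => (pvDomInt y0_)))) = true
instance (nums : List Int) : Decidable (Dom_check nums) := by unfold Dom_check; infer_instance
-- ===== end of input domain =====

-- B replaces A's doubled-array sliding window (with pointer reset and early return) by a single
-- flat pass that counts the circular descents and compares the count with 1 (objective: simpler).

-- ===== PORT A =====
-- fuel = remaining iterations of the while loop; it runs at most 2*n times (j goes 0..2n-1),
-- so fuel (2*n).toNat is exact: fuel hits 0 exactly when j reaches 2*n, where the loop exits with False.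
-- pyGetD with default 0: the indices idx-1, idx lie in [-n, n) whenever the loop body runs, so the
-- default is never used (exact).
def checkLoop (nums : List Int) (n : Int) (i j : Int) : Nat → Bool
  | 0 => false
  | fuel+1 =>
    if i < n ∧ j < 2*n then
      let idx := PySem.Int.mod j n
      let i' := if PySem.List.pyGetD nums (idx - 1) 0 > PySem.List.pyGetD nums idx 0 then j else i
      if j - i' + 1 = n then true
      else checkLoop nums n i' (j+1) fuel
    else false

def check (nums : List Int) : Bool :=
  checkLoop nums (nums.length : Int) 0 0 (2*(nums.length : Int)).toNat

-- ===== PORT B =====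
def check_alt (nums : List Int) : Bool :=
  if (nums.length : Int) = 0 then false
  else
    decide ((PySem.List.pyRange 0 (nums.length : Int) 1).foldl
      (fun c i => if PySem.List.pyGetD nums (i - 1) 0 > PySem.List.pyGetD nums i 0 then c + 1 else c) (0 : Int) ≤ 1)

-- ===== PRECONDITION & SPEC =====
def Spec_check (nums : List Int) (out : Bool) : Prop := out = check_alt nums
instance (nums : List Int) (out : Bool) : Decidable (Spec_check nums out) := by unfold Spec_check; infer_instance

-- ===== CLAIM (what is proved, stated in full; the proofs are below) =====
def Claim_equal_check : Prop := ∀ (nums : List Int), Dom_check nums → Spec_check nums (check nums)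

-- ===== LEMMAS AND PROOFS =====

-- descent at (circular) position j : the Python test nums[idx-1] > nums[idx] with idx = j % n
abbrev dProp (nums : List Int) (n : Int) (j : Int) : Prop :=
  PySem.List.pyGetD nums (PySem.Int.mod j n - 1) 0 > PySem.List.pyGetD nums (PySem.Int.mod j n) 0

theorem mod_idem (n : Int) (hn : 0 < n) (j : Int) :
    PySem.Int.mod (PySem.Int.mod j n) n = PySem.Int.mod j n := by
  simp only [PySem.Int.mod_eq_emod_of_pos hn]
  exact Int.emod_emod_of_dvd _ dvd_rfl

theorem dProp_mod (nums : List Int) (n : Int) (hn : 0 < n) (j : Int) :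
    dProp nums n j ↔ dProp nums n (PySem.Int.mod j n) := by
  unfold dProp
  rw [mod_idem n hn j]

theorem mod_self_of_lt {n q : Int} (h0 : 0 ≤ q) (h1 : q < n) : PySem.Int.mod q n = q := by
  rw [PySem.Int.mod_eq_emod_of_pos (lt_of_le_of_lt h0 h1)]
  exact Int.emod_eq_of_lt h0 h1

theorem mod_shift_of_lt {n q : Int} (h0 : n ≤ q) (h1 : q < 2*n) : PySem.Int.mod q n = q - n := by
  have hn : 0 < n := by omega
  rw [PySem.Int.mod_eq_emod_of_pos hn, ← Int.sub_emod_right q n]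
  exact Int.emod_eq_of_lt (by omega) (by omega)

-- for q strictly between k and k+n (k a residue), q's residue differs from k
theorem mod_ne_of_between {n k q : Int} (hk0 : 0 ≤ k) (hk1 : k < n)
    (hq0 : k < q) (hq1 : q < k + n) : PySem.Int.mod q n ≠ k := by
  by_cases h : q < n
  · rw [mod_self_of_lt (by omega) h]; omega
  · rw [mod_shift_of_lt (by omega) (by omega)]; omega

-- any residue r other than i's own occurs at some position strictly inside (i, i+n-1]
theorem exists_rep {n i r : Int} (hr0 : 0 ≤ r) (hr1 : r < n)
    (hne : r ≠ PySem.Int.mod i n) : ∃ q, i < q ∧ q ≤ i + n - 1 ∧ PySem.Int.mod q n = r := by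
  have hn : 0 < n := by omega
  have hm0 : 0 ≤ PySem.Int.mod (r - i) n := PySem.Int.mod_nonneg _ hn
  have hm1 : PySem.Int.mod (r - i) n < n := PySem.Int.mod_lt _ hn
  have hmain : PySem.Int.mod (i + PySem.Int.mod (r - i) n) n = r := by
    simp only [PySem.Int.mod_eq_emod_of_pos hn]
    rw [Int.add_emod, Int.emod_emod_of_dvd _ dvd_rfl, ← Int.add_emod]
    have h : i + (r - i) = r := by ring
    rw [h]
    exact Int.emod_eq_of_lt hr0 hr1
  have hne0 : PySem.Int.mod (r - i) n ≠ 0 := by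
    intro h0
    apply hne
    have h1 : (r - i) % n = 0 := by
      rw [← PySem.Int.mod_eq_emod_of_pos hn]; exact h0
    have h2 : r % n = i % n := Int.emod_eq_emod_iff_emod_sub_eq_zero.mpr h1
    rw [PySem.Int.mod_eq_emod_of_pos hn, ← h2, Int.emod_eq_of_lt hr0 hr1]
  exact ⟨i + PySem.Int.mod (r - i) n, by omega, by omega, hmain⟩

-- If all positions from j to i+n-1 are descent-free, the loop from (i, j) reaches the
-- full-window check at j = i+n-1 and returns true.
theorem loop_true (nums : List Int) (n : Int) (i : Int) :
    ∀ (fuel : Nat) (j : Int), 0 ≤ i → i < n → i ≤ j → j ≤ i + n - 1 →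
    (2*n - j).toNat ≤ fuel →
    (∀ q, j ≤ q → q ≤ i + n - 1 → ¬ dProp nums n q) →
    checkLoop nums n i j fuel = true := by
  intro fuel
  induction fuel with
  | zero => intro j h0 h1 h2 h3 hf _; omega
  | succ f ih =>
    intro j h0 h1 h2 h3 hf hd
    rw [checkLoop]
    rw [if_pos (by constructor <;> omega)]
    have hdj : ¬ (PySem.List.pyGetD nums (PySem.Int.mod j n - 1) 0 > PySem.List.pyGetD nums (PySem.Int.mod j n) 0) :=
      hd j le_rfl h3
    simp only [if_neg hdj]
    by_cases hj : j = i + n - 1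
    · rw [if_pos (by omega)]
    · rw [if_neg (by omega)]
      exact ih (j+1) h0 h1 (by omega) (by omega) (by omega) (fun q hq1 hq2 => hd q (by omega) hq2)

-- With exactly one descent residue k, the loop walks 0..k-1, resets i to k at j = k,
-- and then loop_true finishes the window; returns true.
theorem loop_one (nums : List Int) (n k : Int) (hn : 2 ≤ n) (hk0 : 0 ≤ k) (hk1 : k < n)
    (hdk : dProp nums n k)
    (honly : ∀ r, 0 ≤ r → r < n → r ≠ k → ¬ dProp nums n r) :
    ∀ (m : Nat) (fuel : Nat) (j : Int), j + (m : Int) = k → 0 ≤ j →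
    (2*n - j).toNat ≤ fuel → checkLoop nums n 0 j fuel = true := by
  have hn0 : (0:Int) < n := by omega
  have hall : ∀ q, PySem.Int.mod q n ≠ k → ¬ dProp nums n q := by
    intro q hq hdq
    exact honly (PySem.Int.mod q n) (PySem.Int.mod_nonneg _ hn0) (PySem.Int.mod_lt _ hn0) hq
      ((dProp_mod nums n hn0 q).mp hdq)
  intro m
  induction m with
  | zero =>
    intro fuel j hj h0 hf
    have hjk : j = k := by omega
    subst hjk
    obtain ⟨f, rfl⟩ : ∃ f, fuel = f + 1 := ⟨fuel - 1, by omega⟩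
    rw [checkLoop]
    rw [if_pos (by constructor <;> omega)]
    have hdj : PySem.List.pyGetD nums (PySem.Int.mod j n - 1) 0 > PySem.List.pyGetD nums (PySem.Int.mod j n) 0 := hdk
    simp only [if_pos hdj]
    rw [if_neg (by omega)]
    exact loop_true nums n j f (j+1) h0 hk1 (by omega) (by omega) (by omega)
      (fun q hq1 hq2 => hall q (mod_ne_of_between h0 hk1 (by omega) (by omega)))
  | succ m ih =>
    intro fuel j hj h0 hf
    obtain ⟨f, rfl⟩ : ∃ f, fuel = f + 1 := ⟨fuel - 1, by omega⟩
    rw [checkLoop]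
    rw [if_pos (by constructor <;> omega)]
    have hdj : ¬ (PySem.List.pyGetD nums (PySem.Int.mod j n - 1) 0 > PySem.List.pyGetD nums (PySem.Int.mod j n) 0) :=
      hall j (by rw [mod_self_of_lt h0 (by omega)]; omega)
    simp only [if_neg hdj]
    rw [if_neg (by omega)]
    exact ih f (j+1) (by simp only [Nat.cast_succ] at hj; omega) (by omega) (by omega)

-- With two distinct descent residues, every window check fails and the loop returns false.
-- Invariant: i is 0 or a descent position, i ≤ j, and (i, j) is descent-free.
theorem loop_false (nums : List Int) (n k1 k2 : Int)
    (hk10 : 0 ≤ k1) (hk11 : k1 < n) (hk20 : 0 ≤ k2) (hk21 : k2 < n) (hne : k1 ≠ k2)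
    (hd1 : dProp nums n k1) (hd2 : dProp nums n k2) :
    ∀ (fuel : Nat) (i j : Int), 0 ≤ i → i ≤ j →
    (i = 0 ∨ dProp nums n i) → (∀ q, i < q → q < j → ¬ dProp nums n q) →
    checkLoop nums n i j fuel = false := by
  have hn : (0:Int) < n := by omega
  have hn2 : (2:Int) ≤ n := by omega
  intro fuel
  induction fuel with
  | zero => intro i j _ _ _ _; rw [checkLoop]
  | succ f ih =>
    intro i j h0 h1 hinv hfree
    rw [checkLoop]
    by_cases hc : i < n ∧ j < 2*n
    · rw [if_pos hc]
      by_cases hdj : PySem.List.pyGetD nums (PySem.Int.mod j n - 1) 0 > PySem.List.pyGetD nums (PySem.Int.mod j n) 0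
      · simp only [if_pos hdj]
        rw [if_neg (by omega)]
        exact ih j (j+1) (by omega) (by omega) (Or.inr hdj) (fun q hq1 hq2 => by omega)
      · simp only [if_neg hdj]
        have hwin : ¬ (j - i + 1 = n) := by
          intro hw
          -- positions (i, i+n-1] = (i, j] are all descent-free, yet some descent residue ≠ i's
          have hfree' : ∀ q, i < q → q ≤ i + n - 1 → ¬ dProp nums n q := by
            intro q hq1 hq2
            by_cases hqj : q = j
            · subst hqj; exact hdj
            · exact hfree q hq1 (by omega)
          have hrne : (k1 ≠ PySem.Int.mod i n ∧ dProp nums n k1 ∧ 0 ≤ k1 ∧ k1 < n)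
              ∨ (k2 ≠ PySem.Int.mod i n ∧ dProp nums n k2 ∧ 0 ≤ k2 ∧ k2 < n) := by
            by_cases h : k1 = PySem.Int.mod i n
            · right; exact ⟨by omega, hd2, hk20, hk21⟩
            · left; exact ⟨h, hd1, hk10, hk11⟩
          obtain ⟨r, hrm, hdr, hr0, hr1⟩ :
              ∃ r, r ≠ PySem.Int.mod i n ∧ dProp nums n r ∧ 0 ≤ r ∧ r < n := by
            rcases hrne with ⟨a, b, c, d⟩ | ⟨a, b, c, d⟩
            · exact ⟨k1, a, b, c, d⟩
            · exact ⟨k2, a, b, c, d⟩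
          obtain ⟨q, hq1, hq2, hq3⟩ := exists_rep hr0 hr1 hrm
          apply hfree' q hq1 hq2
          rw [dProp_mod nums n hn q, hq3]
          rwa [dProp_mod nums n hn r, mod_self_of_lt hr0 hr1] at hdr
        rw [if_neg hwin]
        exact ih i (j+1) h0 (by omega) hinv
          (fun q hq1 hq2 => by
            by_cases hqj : q = j
            · subst hqj; exact hdj
            · exact hfree q hq1 (by omega))
    · rw [if_neg hc]

-- a list with two distinct members has length ≥ 2
theorem two_mem_length {l : List Int} {a b : Int} (ha : a ∈ l) (hb : b ∈ l) (hab : a ≠ b) :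
    2 ≤ l.length := by
  match l with
  | [] => simp at ha
  | [x] => simp at ha hb; omega
  | x :: y :: t => simp only [List.length_cons]; omega

-- a duplicate-free list all of whose members equal k has length ≤ 1
theorem nodup_all_eq_length {l : List Int} {k : Int} (hnd : l.Nodup) (h : ∀ x ∈ l, x = k) :
    l.length ≤ 1 := by
  match l with
  | [] => simp
  | [x] => simp
  | x :: y :: t =>
    exfalso
    have hx : x = k := h x (by simp)
    have hy : y = k := h y (by simp)
    simp [List.nodup_cons] at hnd
    exact hnd.1.1 (by omega)

-- B's fold is the descent count over residues 0..n-1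
theorem alt_count (nums : List Int) (hn : 0 < (nums.length : Int)) :
    check_alt nums =
      decide ((((PySem.List.pyRange 0 (nums.length : Int) 1).countP
        (fun r => decide (dProp nums (nums.length : Int) r)) : Int)) ≤ 1) := by
  unfold check_alt
  rw [if_neg (by omega)]
  have hcongr : (PySem.List.pyRange 0 (nums.length : Int) 1).foldl
      (fun c i => if PySem.List.pyGetD nums (i - 1) 0 > PySem.List.pyGetD nums i 0 then c + 1 else c) (0 : Int)
      = (PySem.List.pyRange 0 (nums.length : Int) 1).foldl
      (fun c i => if dProp nums (nums.length : Int) i then c + 1 else c) (0 : Int) := by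
    apply PySem.List.foldl_congr_mem
    intro acc x hx
    rw [PySem.List.mem_pyRange_one] at hx
    unfold dProp
    rw [mod_self_of_lt hx.1 hx.2]
  rw [hcongr, PySem.List.foldl_ite_add_one]
  simp

theorem check_spec_main (nums : List Int) : check nums = check_alt nums := by
  by_cases hn0 : nums.length = 0
  · -- n = 0 : both sides are false
    unfold check check_alt
    rw [hn0]
    simp [checkLoop]
  · have hn : 0 < (nums.length : Int) := by
      have h := Nat.pos_of_ne_zero hn0
      omega
    by_cases hn1 : (nums.length : Int) = 1
    · -- n = 1 : both sides are true
      have hA : check nums = true := by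
        unfold check
        rw [hn1]
        rw [show ((2*(1:Int)).toNat) = 2 by rfl]
        rw [checkLoop]
        rw [if_pos (by constructor <;> omega)]
        by_cases hd : PySem.List.pyGetD nums (PySem.Int.mod 0 1 - 1) 0 > PySem.List.pyGetD nums (PySem.Int.mod 0 1) 0
        · simp only [if_pos hd]; rw [if_pos (by omega)]
        · simp only [if_neg hd]; rw [if_pos (by omega)]
      have hB : check_alt nums = true := by
        rw [alt_count nums hn, hn1]
        have hle : ((PySem.List.pyRange 0 (1:Int) 1).countP (fun r => decide (dProp nums 1 r))) ≤ 1 := by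
          calc _ ≤ (PySem.List.pyRange 0 (1:Int) 1).length := List.countP_le_length
          _ = 1 := by rw [PySem.List.length_pyRange_one]; rfl
        rw [decide_eq_true_eq]
        omega
      rw [hA, hB]
    · have hn2 : (2:Int) ≤ (nums.length : Int) := by omega
      set n : Int := (nums.length : Int) with hndef
      rw [alt_count nums hn, ← hndef]
      by_cases hc0 : ∀ r, 0 ≤ r → r < n → ¬ dProp nums n r
      · -- no descent : both true
        have hA : check nums = true := by
          unfold check
          rw [← hndef]
          apply loop_true nums n 0 (2*n).toNat 0 le_rfl (by omega) le_rfl (by omega) (by omega)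
          intro q hq1 hq2 hd
          exact hc0 (PySem.Int.mod q n) (PySem.Int.mod_nonneg _ (by omega)) (PySem.Int.mod_lt _ (by omega))
            ((dProp_mod nums n (by omega) q).mp hd)
        rw [hA]
        have hz : (PySem.List.pyRange 0 n 1).countP (fun r => decide (dProp nums n r)) = 0 := by
          rw [List.countP_eq_zero]
          intro r hr
          rw [PySem.List.mem_pyRange_one] at hr
          simpa using hc0 r hr.1 hr.2
        rw [hz]
        simp
      · push Not at hc0
        obtain ⟨k, hk0, hk1, hdk⟩ := hc0
        by_cases honly : ∀ r, 0 ≤ r → r < n → r ≠ k → ¬ dProp nums n r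
        · -- exactly one descent residue k : both true
          have hA : check nums = true := by
            unfold check
            rw [← hndef]
            exact loop_one nums n k hn2 hk0 hk1 hdk honly k.toNat (2*n).toNat 0 (by omega) le_rfl (by omega)
          rw [hA]
          have hle : ((PySem.List.pyRange 0 n 1).countP (fun r => decide (dProp nums n r))) ≤ 1 := by
            have hfn := nodup_all_eq_length
              (l := (PySem.List.pyRange 0 n 1).filter (fun r => decide (dProp nums n r))) (k := k)
              ((PySem.List.nodup_pyRange_one 0 n).filter _)
              (by
                intro x hx
                rw [List.mem_filter] at hx
                have hx1 := hx.1
                rw [PySem.List.mem_pyRange_one] at hx1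
                by_contra hxk
                exact honly x hx1.1 hx1.2 hxk (by simpa using hx.2))
            rwa [← List.countP_eq_length_filter] at hfn
          symm
          rw [decide_eq_true_eq]
          omega
        · -- at least two descent residues : both false
          push Not at honly
          obtain ⟨k2, hk20, hk21, hk2ne, hdk2⟩ := honly
          have hA : check nums = false := by
            unfold check
            rw [← hndef]
            exact loop_false nums n k k2 hk0 hk1 hk20 hk21 (fun h => hk2ne h.symm) hdk hdk2
              (2*n).toNat 0 0 le_rfl le_rfl (Or.inl rfl) (fun q hq1 hq2 => by omega)
          rw [hA]
          have h2 : 2 ≤ ((PySem.List.pyRange 0 n 1).countP (fun r => decide (dProp nums n r))) := by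
            rw [List.countP_eq_length_filter]
            apply two_mem_length (a := k) (b := k2)
            · rw [List.mem_filter, PySem.List.mem_pyRange_one]; exact ⟨⟨hk0, hk1⟩, by simpa using hdk⟩
            · rw [List.mem_filter, PySem.List.mem_pyRange_one]; exact ⟨⟨hk20, hk21⟩, by simpa using hdk2⟩
            · exact fun h => hk2ne h.symm
          symm
          rw [decide_eq_false_iff_not]
          omega

-- ===== VERDICT (by name: the statement is the Claim_ definition above) =====
theorem check_spec : Claim_equal_check := by
  intro nums _
  unfold Spec_check
  exact check_spec_main nums
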